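-- pv_equiv track=rewrite | github.com/kreativetimebox/bank-statement-backend | correct.py | build_ground_truth_str
-- ===== SOURCE A (Python) =====
-- from collections import defaultdict
--
-- FIELD_ORDER = [
--     "Invoice Number",
--     "Receipt Date",
--     "Supplier Name",
--     "Item Name",
--     "Item Quantity",
--     "Item Unit Price",
--     "Item Amount",
--     "Item VAT Code",
--     "VAT Code",
--     "VAT Percent",
--     "VAT Amount",
--     "Net Amount",
--     "Total Amount",
--     "Payment Method",
--     "Total Item Count",
--     "Currency",
--     "Coupon Name",
--     "Total Discount"
-- ]
--
-- def build_ground_truth_str(pairs):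
--     """
--     Build the ground_truth string manually:
--       - Keep duplicates
--       - Missing fields → ""
--       - Order fixed by FIELD_ORDER
--     """
--     field_values = defaultdict(list)
--     for lbl, txt in pairs:
--         field_values[lbl].append(txt)
--
--     lines = []
--     for field in FIELD_ORDER:
--         if field in field_values:
--             for v in field_values[field]:
--                 lines.append(f' "{field}": "{v}"')
--         else:
--             lines.append(f' "{field}": ""')
--
--     body = ",".join(lines)
--     return "{ " + body + " }"
-- ===== SOURCE B (Python) =====
-- FIELD_ORDER = [
--     "Invoice Number",
--     "Receipt Date",
--     "Supplier Name",
--     "Item Name",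
--     "Item Quantity",
--     "Item Unit Price",
--     "Item Amount",
--     "Item VAT Code",
--     "VAT Code",
--     "VAT Percent",
--     "VAT Amount",
--     "Net Amount",
--     "Total Amount",
--     "Payment Method",
--     "Total Item Count",
--     "Currency",
--     "Coupon Name",
--     "Total Discount"
-- ]
--
-- def build_ground_truth_str(pairs):
--     """Sort-then-merge: tag each relevant pair with its field's rank, stable-sort
--     by rank, then merge the sorted stream against FIELD_ORDER in one pass,
--     emitting '""' for ranks absent from the stream."""
--     tagged = sorted(
--         [(FIELD_ORDER.index(lbl), txt) for lbl, txt in pairs if lbl in FIELD_ORDER],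
--         key=lambda p: p[0],
--     )
--     lines = []
--     rest = tagged
--     for i, field in enumerate(FIELD_ORDER):
--         block = []
--         while rest and rest[0][0] == i:
--             block.append(rest[0][1])
--             rest = rest[1:]
--         if block:
--             for t in block:
--                 lines.append(f' "{field}": "{t}"')
--         else:
--             lines.append(f' "{field}": ""')
--     return "{ " + ",".join(lines) + " }"
-- ===== Notes on version B (the rewrite author's own statement) =====
-- stated objective: alternative
-- what changed: Replaced A's defaultdict grouping + per-field dict lookup with a tag/stable-sort/merge pipeline: each relevant pair is tagged with its field's rank, the tagged list is stable-sorted by rank, and one merge pass over the sorted stream against FIELD_ORDER emits lines (empty-quoted line for ranks absent from the stream).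
import Mathlib
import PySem

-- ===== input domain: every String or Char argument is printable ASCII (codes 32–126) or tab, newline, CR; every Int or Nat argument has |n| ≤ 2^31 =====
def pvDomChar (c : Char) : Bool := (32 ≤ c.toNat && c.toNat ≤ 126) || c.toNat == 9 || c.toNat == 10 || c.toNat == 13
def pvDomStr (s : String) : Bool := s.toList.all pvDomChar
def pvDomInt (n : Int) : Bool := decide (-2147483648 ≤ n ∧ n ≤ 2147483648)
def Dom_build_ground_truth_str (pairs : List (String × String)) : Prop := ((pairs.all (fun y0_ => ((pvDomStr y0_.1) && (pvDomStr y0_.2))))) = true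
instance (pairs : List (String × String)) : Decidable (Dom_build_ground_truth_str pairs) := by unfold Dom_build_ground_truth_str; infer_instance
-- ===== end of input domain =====

-- B replaces A's defaultdict grouping with tag / stable-sort-by-field-rank / merge against FIELD_ORDER (alternative algorithm); same return value.

def FIELD_ORDER : List String := [
  "Invoice Number", "Receipt Date", "Supplier Name", "Item Name",
  "Item Quantity", "Item Unit Price", "Item Amount", "Item VAT Code",
  "VAT Code", "VAT Percent", "VAT Amount", "Net Amount", "Total Amount",
  "Payment Method", "Total Item Count", "Currency", "Coupon Name",
  "Total Discount"]

-- ===== PORT A =====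
-- f' "{field}": "{v}"'
def pvFmtA (field v : String) : String := " \"" ++ field ++ "\": \"" ++ v ++ "\""

def build_ground_truth_str (pairs : List (String × String)) : String :=
  -- field_values = defaultdict(list); for lbl, txt in pairs: field_values[lbl].append(txt)
  let field_values : PySem.Dict String (List String) :=
    pairs.foldl (fun d p => d.modify p.1 [] (· ++ [p.2])) PySem.Dict.empty
  -- for field in FIELD_ORDER: …
  let lines : List String :=
    FIELD_ORDER.foldl (fun lines field =>
      if field_values.contains field then
        -- for v in field_values[field]: lines.append(…)
        (field_values.getD field []).foldl (fun ls v => ls ++ [pvFmtA field v]) lines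
      else
        lines ++ [pvFmtA field ""]) []
  "{ " ++ PySem.Str.join "," lines ++ " }"

-- ===== PORT B =====
def pvFmtB (field v : String) : String := " \"" ++ field ++ "\": \"" ++ v ++ "\""

-- [(FIELD_ORDER.index(lbl), txt) for lbl, txt in pairs if lbl in FIELD_ORDER]
-- ('lbl in FIELD_ORDER' guard + '.index' = index?, which is some exactly on members)
def pvTag (pairs : List (String × String)) : List (Nat × String) :=
  pairs.filterMap (fun p =>
    match PySem.List.index? FIELD_ORDER p.1 with
    | some i => some (i, p.2)
    | none => none)

-- the inner 'while rest and rest[0][0] == i: block.append(rest[0][1]); rest = rest[1:]'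
def pvTakeBlock (i : Nat) : List (Nat × String) → List String × List (Nat × String)
  | (k, t) :: rest =>
      if k == i then
        let (b, r) := pvTakeBlock i rest
        (t :: b, r)
      else ([], (k, t) :: rest)
  | [] => ([], [])

-- 'for i, field in enumerate(FIELD_ORDER): …' threading the remaining sorted stream
def pvMerge : Nat → List String → List (Nat × String) → List String
  | i, f :: fs, rest =>
      let br := pvTakeBlock i rest
      (if br.1.isEmpty then [pvFmtB f ""] else br.1.map (pvFmtB f)) ++ pvMerge (i + 1) fs br.2
  | _, [], _ => []

def build_ground_truth_str_alt (pairs : List (String × String)) : String :=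
  let tagged := PySem.List.sorted (pvTag pairs) (·.1) false   -- sorted(…, key=lambda p: p[0]) (stable)
  "{ " ++ PySem.Str.join "," (pvMerge 0 FIELD_ORDER tagged) ++ " }"

-- ===== PRECONDITION & SPEC =====
def Spec_build_ground_truth_str (pairs : List (String × String)) (out : String) : Prop := out = build_ground_truth_str_alt pairs
instance (pairs : List (String × String)) (out : String) : Decidable (Spec_build_ground_truth_str pairs out) := by unfold Spec_build_ground_truth_str; infer_instance

-- ===== CLAIM (what is proved, stated in full; the proofs are below) =====
def Claim_equal_build_ground_truth_str : Prop := ∀ (pairs : List (String × String)), Dom_build_ground_truth_str pairs → Spec_build_ground_truth_str pairs (build_ground_truth_str pairs)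

-- ===== LEMMAS AND PROOFS =====

-- proof-side helpers
def pvLinesFor (pairs : List (String × String)) (field : String) : List String :=
  let vals := (pairs.filter (fun p => p.1 == field)).map (·.2)
  if vals.isEmpty then [pvFmtB field ""] else vals.map (pvFmtB field)

def pvBucket (xs : List (Nat × String)) (j : Nat) : List (Nat × String) :=
  xs.filter (fun p => p.1 == j)

def pvVals (pairs : List (String × String)) (f : String) : List String :=
  (pairs.filter (fun p => p.1 == f)).map (·.2)

-- ---------- A side: A's lines are the flatMap of per-field lines ----------
theorem contains_group_fold (pairs : List (String × String))
    (d : PySem.Dict String (List String)) (field : String) :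
    (pairs.foldl (fun d p => d.modify p.1 [] (· ++ [p.2])) d).contains field
      = (d.contains field || pairs.any (fun p => p.1 == field)) := by
  induction pairs generalizing d with
  | nil => simp
  | cons p rest ih =>
    simp only [List.foldl_cons, List.any_cons, ih, PySem.Dict.contains_modify]
    by_cases h : p.1 = field
    · subst h; simp
    · have h1 : (field == p.1) = false := by simpa using Ne.symm h
      have h2 : (p.1 == field) = false := by simpa using h
      simp [h1, h2]

theorem any_eq_not_isEmpty (pairs : List (String × String)) (field : String) :
    pairs.any (fun p => p.1 == field)
      = !((pairs.filter (fun p => p.1 == field)).map (·.2)).isEmpty := by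
  induction pairs with
  | nil => simp
  | cons p rest ih =>
    by_cases h : p.1 = field
    · simp [h]
    · simp [h, ih]

theorem step_eq (pairs : List (String × String)) (field : String) (lines : List String) :
    (if (pairs.foldl (fun d p => d.modify p.1 [] (· ++ [p.2])) PySem.Dict.empty).contains field then
        ((pairs.foldl (fun d p => d.modify p.1 [] (· ++ [p.2])) PySem.Dict.empty).getD field []).foldl
          (fun ls v => ls ++ [pvFmtA field v]) lines
      else lines ++ [pvFmtA field ""])
      = lines ++ pvLinesFor pairs field := by
  rw [contains_group_fold, PySem.Dict.getD_foldl_modify_append]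
  simp only [PySem.Dict.contains_empty, PySem.Dict.getD_empty, Bool.false_or, List.nil_append,
    PySem.List.foldl_append_singleton_eq_map, any_eq_not_isEmpty, pvLinesFor, pvFmtA, pvFmtB]
  by_cases h : ((pairs.filter (fun p => p.1 == field)).map (·.2)).isEmpty <;> simp [h, pvFmtB]

theorem a_eq_flatMap (pairs : List (String × String)) :
    build_ground_truth_str pairs
      = "{ " ++ PySem.Str.join "," (FIELD_ORDER.flatMap (pvLinesFor pairs)) ++ " }" := by
  unfold build_ground_truth_str
  simp only [step_eq]
  rw [PySem.List.foldl_append_eq_flatMap, List.nil_append]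

-- ---------- B side ----------
theorem nodup_FO : FIELD_ORDER.Nodup := by decide

-- index? facts
theorem idx_some {l : String} {j : Nat}
    (h : PySem.List.index? FIELD_ORDER l = some j) :
    ∃ hj : j < FIELD_ORDER.length, FIELD_ORDER[j] = l := by
  obtain ⟨hk, he, _⟩ := PySem.List.getElem_of_index?_eq_some h
  exact ⟨hk, he⟩

theorem idx_of_getElem {j : Nat} (hj : j < FIELD_ORDER.length) :
    PySem.List.index? FIELD_ORDER (FIELD_ORDER[j]) = some j := by
  rw [PySem.List.index?_eq_some_iff]
  refine ⟨FIELD_ORDER.take j, FIELD_ORDER.drop (j + 1), ?_,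
    List.length_take_of_le (Nat.le_of_lt hj), ?_⟩
  · conv_lhs => rw [← List.take_append_drop j FIELD_ORDER]
    congr 1
    exact (List.getElem_cons_drop hj).symm
  · intro hmem
    obtain ⟨m, hm, hme⟩ := List.getElem_of_mem hmem
    have hmj : m < j := by simp [List.length_take] at hm; omega
    have hmlen : m < FIELD_ORDER.length := Nat.lt_trans hmj hj
    have hgg : FIELD_ORDER[m] = FIELD_ORDER[j] := by
      rw [← hme]; simp [List.getElem_take]
    exact absurd ((List.Nodup.getElem_inj_iff nodup_FO).mp hgg) (Nat.ne_of_lt hmj)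

theorem pvTag_cons (p : String × String) (rest : List (String × String)) :
    pvTag (p :: rest) = (match PySem.List.index? FIELD_ORDER p.1 with
      | some i => [(i, p.2)]
      | none => []) ++ pvTag rest := by
  unfold pvTag
  rw [List.filterMap_cons]
  cases PySem.List.index? FIELD_ORDER p.1 <;> simp

theorem pvBucket_cons (x : Nat × String) (xs : List (Nat × String)) (j : Nat) :
    pvBucket (x :: xs) j = (if x.1 = j then [x] else []) ++ pvBucket xs j := by
  by_cases h : x.1 = j <;> simp [pvBucket, h]

-- bucket j of the tagged list = the j-th field's values, tagged with j
theorem bucket_tag (pairs : List (String × String)) {j : Nat} (hj : j < FIELD_ORDER.length) :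
    pvBucket (pvTag pairs) j = (pvVals pairs (FIELD_ORDER[j])).map (fun t => (j, t)) := by
  induction pairs with
  | nil => simp [pvBucket, pvTag, pvVals]
  | cons p rest ih =>
    rw [pvTag_cons]
    cases hidx : PySem.List.index? FIELD_ORDER p.1 with
    | none =>
      have hne : (p.1 == FIELD_ORDER[j]) = false := by
        apply beq_false_of_ne; intro he
        rw [he, idx_of_getElem hj] at hidx; simp at hidx
      simp only [List.nil_append]
      rw [ih]
      unfold pvVals
      simp [hne]
    | some i =>
      obtain ⟨hi, hie⟩ := idx_some hidx
      by_cases hij : i = j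
      · subst hij
        have heq : (p.1 == FIELD_ORDER[i]) = true := by simp [hie]
        rw [List.singleton_append, pvBucket_cons]
        rw [ih]
        unfold pvVals
        simp [heq]
      · have hne : (p.1 == FIELD_ORDER[j]) = false := by
          apply beq_false_of_ne; intro he
          have hgg : FIELD_ORDER[i] = FIELD_ORDER[j] := by rw [hie, he]
          exact hij ((List.Nodup.getElem_inj_iff nodup_FO).mp hgg)
        rw [List.singleton_append, pvBucket_cons]
        rw [ih]
        unfold pvVals
        simp [hne, hij]

theorem mem_bucket_key {xs : List (Nat × String)} {j : Nat} {y : Nat × String}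
    (h : y ∈ pvBucket xs j) : y.1 = j := by
  simp only [pvBucket, List.mem_filter] at h
  simpa using h.2

theorem flatMap_congr' {α β : Type} {L : List α} {f g : α → List β}
    (h : ∀ x ∈ L, f x = g x) : L.flatMap f = L.flatMap g := by
  induction L with
  | nil => rfl
  | cons a t ih => simp [List.flatMap_cons, h a (by simp), ih (fun x hx => h x (by simp [hx]))]

-- insertBy places x after every element it is not-before and before the rest
theorem insertBy_middle (x : Nat × String) (l₁ l₂ : List (Nat × String))
    (h1 : ∀ y ∈ l₁, ¬ x.1 < y.1)
    (h2 : ∀ z zs, l₂ = z :: zs → x.1 < z.1) :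
    PySem.List.insertBy (fun a b => decide (a.1 < b.1)) x (l₁ ++ l₂) = l₁ ++ x :: l₂ := by
  induction l₁ with
  | nil =>
    cases l₂ with
    | nil => rfl
    | cons z zs =>
      have := h2 z zs rfl
      simp [PySem.List.insertBy, this]
  | cons a t ih =>
    have hna : ¬ x.1 < a.1 := h1 a (by simp)
    simp only [List.cons_append, PySem.List.insertBy, decide_eq_true_eq, if_neg hna]
    rw [ih (fun y hy => h1 y (by simp [hy]))]

theorem mem_flatMap_bucket_lt {xs : List (Nat × String)} {s n : Nat} {y : Nat × String}
    (h : y ∈ (List.range' s n).flatMap (pvBucket xs)) : s ≤ y.1 ∧ y.1 < s + n := by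
  obtain ⟨j, hj, hy⟩ := List.mem_flatMap.mp h
  have := mem_bucket_key hy
  have hr := List.mem_range'_1.mp hj
  omega

-- a stable sort by keys below n is the concatenation of the key buckets
theorem sorted_eq_buckets (n : Nat) (xs : List (Nat × String))
    (h : ∀ p ∈ xs, p.1 < n) :
    PySem.List.sorted xs (·.1) false = (List.range' 0 n).flatMap (pvBucket xs) := by
  rw [PySem.List.sorted_eq_foldl_insertBy]
  induction xs using List.reverseRecOn with
  | nil => simp [pvBucket]
  | append_singleton xs x ih =>
    rw [List.foldl_append, List.foldl_cons, List.foldl_nil,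
      ih (fun p hp => h p (by simp [hp]))]
    have hx : x.1 < n := h x (by simp)
    have hsplit : List.range' 0 n
        = List.range' 0 (x.1 + 1) ++ List.range' (x.1 + 1) (n - (x.1 + 1)) := by
      have h1 := @List.range'_append 0 (x.1 + 1) (n - (x.1 + 1)) 1
      simp only [Nat.zero_add, Nat.one_mul] at h1
      rw [h1]; congr 1; omega
    have hsplit2 : List.range' 0 (x.1 + 1) = List.range' 0 x.1 ++ [x.1] := by
      have h1 := @List.range'_append 0 x.1 1 1
      simp only [Nat.zero_add, Nat.one_mul, List.range'_one] at h1
      rw [← h1]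
    have hbnew : ∀ j, pvBucket (xs ++ [x]) j = pvBucket xs j ++ (if x.1 = j then [x] else []) := by
      intro j
      simp only [pvBucket, List.filter_append, List.filter_cons, List.filter_nil]
      by_cases hj : x.1 = j <;> simp [hj]
    have e1 : (List.range' 0 x.1).flatMap (pvBucket (xs ++ [x]))
        = (List.range' 0 x.1).flatMap (pvBucket xs) :=
      flatMap_congr' (fun j hj => by
        have := List.mem_range'_1.mp hj
        have hne : x.1 ≠ j := by omega
        simp [hbnew, hne])
    have e2 : pvBucket (xs ++ [x]) x.1 = pvBucket xs x.1 ++ [x] := by simp [hbnew]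
    have e3 : (List.range' (x.1 + 1) (n - (x.1 + 1))).flatMap (pvBucket (xs ++ [x]))
        = (List.range' (x.1 + 1) (n - (x.1 + 1))).flatMap (pvBucket xs) :=
      flatMap_congr' (fun j hj => by
        have := List.mem_range'_1.mp hj
        have hne : x.1 ≠ j := by omega
        simp [hbnew, hne])
    have hR : (List.range' 0 n).flatMap (pvBucket (xs ++ [x]))
        = ((List.range' 0 x.1).flatMap (pvBucket xs) ++ pvBucket xs x.1)
          ++ x :: ((List.range' (x.1 + 1) (n - (x.1 + 1))).flatMap (pvBucket xs)) := by
      rw [hsplit, hsplit2]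
      simp only [List.flatMap_append, List.flatMap_cons, List.flatMap_nil, e1, e2, e3,
        List.append_nil]
      simp [List.append_assoc]
    have hL : (List.range' 0 n).flatMap (pvBucket xs)
        = ((List.range' 0 x.1).flatMap (pvBucket xs) ++ pvBucket xs x.1)
          ++ (List.range' (x.1 + 1) (n - (x.1 + 1))).flatMap (pvBucket xs) := by
      rw [hsplit, hsplit2]
      simp only [List.flatMap_append, List.flatMap_cons, List.flatMap_nil, List.append_nil]
    rw [hR, hL]
    exact insertBy_middle x _ _
      (fun y hy => by
        rcases List.mem_append.mp hy with hm | hm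
        · have := (mem_flatMap_bucket_lt hm).2; omega
        · have := mem_bucket_key hm; omega)
      (fun z zs hz => by
        have hmem : z ∈ (List.range' (x.1 + 1) (n - (x.1 + 1))).flatMap (pvBucket xs) := by
          rw [hz]; simp
        have := (mem_flatMap_bucket_lt hmem).1; omega)

-- the while loop consumes exactly the leading block of key i
theorem takeBlock_spec (i : Nat) (vals : List String) (rest : List (Nat × String))
    (h : ∀ z zs, rest = z :: zs → z.1 ≠ i) :
    pvTakeBlock i ((vals.map (fun t => (i, t))) ++ rest) = (vals, rest) := by
  induction vals with
  | nil =>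
    cases rest with
    | nil => rfl
    | cons z zs =>
      have : (z.1 == i) = false := by simpa using h z zs rfl
      simp [pvTakeBlock, this]
  | cons v vs ih =>
    simp [pvTakeBlock, ih]

-- the merge pass over a bucket-concatenated stream yields the per-field lines
theorem merge_spec (pairs : List (String × String)) (fs : List String) (i : Nat)
    (hb : ∀ j (hj : j < fs.length),
      pvBucket (pvTag pairs) (i + j) = (pvVals pairs fs[j]).map (fun t => (i + j, t))) :
    pvMerge i fs ((List.range' i fs.length).flatMap (pvBucket (pvTag pairs)))
      = fs.flatMap (pvLinesFor pairs) := by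
  induction fs generalizing i with
  | nil => simp [pvMerge]
  | cons f fs ih =>
    have hb0 := hb 0 (by simp)
    simp only [List.getElem_cons_zero, Nat.add_zero] at hb0
    rw [List.length_cons, List.range'_succ, List.flatMap_cons, hb0]
    have hts := takeBlock_spec i (pvVals pairs f)
      ((List.range' (i + 1) fs.length).flatMap (pvBucket (pvTag pairs)))
      (fun z zs hz => by
        have hmem : z ∈ (List.range' (i + 1) fs.length).flatMap (pvBucket (pvTag pairs)) := by
          rw [hz]; simp
        have := (mem_flatMap_bucket_lt hmem).1; omega)
    simp only [pvMerge, hts, List.flatMap_cons]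
    have hlf : pvLinesFor pairs f
        = (if (pvVals pairs f).isEmpty then [pvFmtB f ""] else (pvVals pairs f).map (pvFmtB f)) := rfl
    rw [← hlf]
    have hrest := ih (i + 1) (fun j hj => by
      have h2 := hb (j + 1) (by simpa using Nat.succ_lt_succ hj)
      simpa [Nat.add_assoc, Nat.add_comm 1 j] using h2)
    rw [hrest]

theorem tag_keys_lt (pairs : List (String × String)) :
    ∀ p ∈ pvTag pairs, p.1 < FIELD_ORDER.length := by
  induction pairs with
  | nil => intro p hp; simp [pvTag] at hp
  | cons q rest ih =>
    intro p hp
    rw [pvTag_cons] at hp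
    rcases List.mem_append.mp hp with hm | hm
    · cases hidx : PySem.List.index? FIELD_ORDER q.1 with
      | none => rw [hidx] at hm; simp at hm
      | some i =>
        rw [hidx] at hm
        simp at hm
        obtain ⟨hi, _⟩ := idx_some hidx
        subst hm; exact hi
    · exact ih p hm

theorem b_eq_flatMap (pairs : List (String × String)) :
    build_ground_truth_str_alt pairs
      = "{ " ++ PySem.Str.join "," (FIELD_ORDER.flatMap (pvLinesFor pairs)) ++ " }" := by
  unfold build_ground_truth_str_alt
  have hs := sorted_eq_buckets FIELD_ORDER.length (pvTag pairs) (tag_keys_lt pairs)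
  have hm := merge_spec pairs FIELD_ORDER 0 (fun j hj => by simpa using bucket_tag pairs hj)
  simp only [hs, hm]

-- ===== VERDICT (by name: the statement is the Claim_ definition above) =====
theorem build_ground_truth_str_spec : Claim_equal_build_ground_truth_str := by
  intro pairs _
  unfold Spec_build_ground_truth_str
  rw [a_eq_flatMap, b_eq_flatMap]
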